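-- pv_equiv track=rewrite | github.com/aarivera7/ProyectoFinCicloAdrianRivera | Python/Ejercicio4.py | remplazarCuadrantes
-- ===== SOURCE A (Python) =====
-- def remplazarCuadrantes(M,n):
--         """El metodo recibe una matriz 2n*2n con 4 cuadrantes, y remplaza el primer cuadrante
--         con el tercero yel segundo con el cuarto. Se envia como parámetro
--         la matriz y el tamaño del cuadrante."""
--
--
--         #Ciclo que controla en que cuadrante se esta remplazando los valores
--         for i in range(2):
--                 n1 = (2*n) - (n*i) #Calcula cual es la ultima columna del cuadrante 3 y 4
--                 aux1 = M[n][n1-1]  #Guarda los valores que poseian los cuadrantes 3 y 4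
--                 aux2 = M[0][i*n]  #Guarda los valores que poseian los cuadrantes 1 y 2
--
--         #Remplaza los valores de los cuadrantes inferiores a los superiores del 3 al 1 y del 4 al 2
-- 		#El primer ciclo recorre las filas correpondientes al primer y tercer cuadrante
--                 for j in range(n):
--                         #El segundo ciclo recorre las columnas correpondientes al primer y tercer cuadrante
--                         for k in range((i*n),n + (i*n)):
--                                 M[j][k] = aux1
--
--         #Remplaza los valores de los cuadrantes superiores a los inferiores del 1 al 3 y del 2 al 4
-- 		#El primer ciclo recorre la filas correpondientes al segundo y cuarto cuadrante
--                 for j in range(n,2*n):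
--                         #El segundo ciclo recorre las filas correpondientes al segundo y cuarto cuadrante
--                         for k in range(n - (n*i),n1):
--                                 M[j][k] = aux2
--         return M
-- ===== SOURCE B (Python) =====
-- def remplazarCuadrantes(M, n):
--     """Row-template approach: read the four original fill values, build the top-half
--     and bottom-half row templates once with list repetition, then splice each template
--     into the first 2n columns of the corresponding rows by whole-row slice assignment.
--     Mutates M's rows in place like A; the equivalence claim is about the return value."""
--     tl = M[n][2*n - 1]
--     br = M[0][0]
--     tr = M[n][n - 1]
--     bl = M[0][n]
--     top = [tl] * n + [tr] * n
--     bot = [bl] * n + [br] * n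
--     for j in range(n):
--         M[j][:2*n] = top
--     for j in range(n, 2*n):
--         M[j][:2*n] = bot
--     return M
-- ===== Notes on version B (the rewrite author's own statement) =====
-- stated objective: alternative
-- what changed: A performs four nested per-cell block-fill loops (two per iteration of a 2-step outer loop, re-deriving the fill values each time); B never writes cells individually: it builds the top-half and bottom-half row templates once by list repetition and splices each template into the first 2n columns of every affected row with a single whole-row slice assignment, so the inner column loop disappears.
import Mathlib
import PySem

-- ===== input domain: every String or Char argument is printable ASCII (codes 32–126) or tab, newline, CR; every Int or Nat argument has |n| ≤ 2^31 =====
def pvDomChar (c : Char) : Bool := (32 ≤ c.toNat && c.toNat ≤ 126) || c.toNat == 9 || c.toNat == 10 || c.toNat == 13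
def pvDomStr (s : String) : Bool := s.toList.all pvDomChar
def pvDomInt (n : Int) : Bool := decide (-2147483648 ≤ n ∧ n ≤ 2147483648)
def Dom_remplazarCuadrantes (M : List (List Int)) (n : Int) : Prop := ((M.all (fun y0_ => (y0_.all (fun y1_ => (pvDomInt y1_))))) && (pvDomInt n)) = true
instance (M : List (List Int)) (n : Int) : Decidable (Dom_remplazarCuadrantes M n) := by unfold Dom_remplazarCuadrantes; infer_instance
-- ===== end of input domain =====

-- B replaces A's four nested per-cell block-fill loops with two row templates built once
-- by list repetition and spliced into each affected row by whole-row slice assignment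
-- (objective: alternative, no inner column loop).  Both Pythons mutate M in place; the
-- equivalence proved here is about the RETURN value only.

-- ===== PORT A =====
-- M[i][j] as an rvalue (total form; Pre_ keeps the reads in range where Python would raise)
def pyGet2 (M : List (List Int)) (i j : Int) : Int :=
  PySem.List.pyGetD (PySem.List.pyGetD M i []) j 0

-- M[i][j] = v (total form; out-of-range writes, no-ops here, are excluded by Pre_)
def pySet2 (M : List (List Int)) (i j : Int) (v : Int) : List (List Int) :=
  PySem.List.pySetD M i (PySem.List.pySetD (PySem.List.pyGetD M i []) j v)

-- the nested 'for j in range(..): for k in range(..): M[j][k] = v' block-fill loops of A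
def fillRect (M : List (List Int)) (jlo jhi klo khi : Int) (v : Int) : List (List Int) :=
  (PySem.List.pyRange jlo jhi 1).foldl
    (fun M j => (PySem.List.pyRange klo khi 1).foldl (fun M k => pySet2 M j k v) M) M

def remplazarCuadrantes (M : List (List Int)) (n : Int) : List (List Int) :=
  (PySem.List.pyRange 0 2 1).foldl
    (fun M i =>
      let n1 := 2 * n - n * i
      let aux1 := pyGet2 M n (n1 - 1)
      let aux2 := pyGet2 M 0 (i * n)
      let M1 := fillRect M 0 n (i * n) (n + i * n) aux1
      fillRect M1 n (2 * n) (n - n * i) n1 aux2) M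

-- ===== PORT B =====
-- 'M[j][:2*n] = top' — Python list slice assignment — is 'row := top ++ row[2*n:]',
-- exact here since 2*n ≥ 0 whenever the loop runs.
def remplazarCuadrantes_alt (M : List (List Int)) (n : Int) : List (List Int) :=
  let tl := pyGet2 M n (2 * n - 1)
  let br := pyGet2 M 0 0
  let tr := pyGet2 M n (n - 1)
  let bl := pyGet2 M 0 n
  let top := List.replicate n.toNat tl ++ List.replicate n.toNat tr
  let bot := List.replicate n.toNat bl ++ List.replicate n.toNat br
  let M1 := (PySem.List.pyRange 0 n 1).foldl
    (fun M j => PySem.List.pySetD M j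
      (top ++ PySem.List.slice (PySem.List.pyGetD M j []) (some (2 * n)) none)) M
  (PySem.List.pyRange n (2 * n) 1).foldl
    (fun M j => PySem.List.pySetD M j
      (bot ++ PySem.List.slice (PySem.List.pyGetD M j []) (some (2 * n)) none)) M1

-- ===== PRECONDITION & SPEC =====
-- Pre_ = exactly the inputs where the Python A returns (no IndexError): for n ≥ 1 the first
-- 2n rows must exist and be at least 2n long (this covers every read and write); for n ≤ 0
-- nothing is written and only the four (possibly negatively wrapped) corner reads must be
-- in range (Python's rule: index i into a list of length L is valid iff -L ≤ i < L).
def Pre_remplazarCuadrantes (M : List (List Int)) (n : Int) : Prop :=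
  (1 ≤ n ∧ 2 * n ≤ (M.length : Int) ∧
     ∀ row ∈ M.take (2 * n).toNat, 2 * n ≤ (row.length : Int))
  ∨ (n ≤ 0 ∧
     (-(M.length : Int) ≤ n ∧ n < (M.length : Int)) ∧ 0 < (M.length : Int) ∧
     (-(((PySem.List.pyGetD M n []).length : Int)) ≤ 2 * n - 1 ∧
        2 * n - 1 < ((PySem.List.pyGetD M n []).length : Int)) ∧
     (-(((PySem.List.pyGetD M n []).length : Int)) ≤ n - 1 ∧
        n - 1 < ((PySem.List.pyGetD M n []).length : Int)) ∧
     0 < ((PySem.List.pyGetD M 0 []).length : Int) ∧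
     (-(((PySem.List.pyGetD M 0 []).length : Int)) ≤ n ∧
        n < ((PySem.List.pyGetD M 0 []).length : Int)))
instance (M : List (List Int)) (n : Int) : Decidable (Pre_remplazarCuadrantes M n) := by
  unfold Pre_remplazarCuadrantes; infer_instance

def pvWitness_remplazarCuadrantes : List (List Int) × Int := ([[1, 2], [3, 4]], 1)

def Spec_remplazarCuadrantes (M : List (List Int)) (n : Int) (out : List (List Int)) : Prop := out = remplazarCuadrantes_alt M n
instance (M : List (List Int)) (n : Int) (out : List (List Int)) : Decidable (Spec_remplazarCuadrantes M n out) := by unfold Spec_remplazarCuadrantes; infer_instance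

-- ===== CLAIM (what is proved, stated in full; the proofs are below) =====
def Claim_equal_remplazarCuadrantes : Prop := ∀ (M : List (List Int)) (n : Int), Dom_remplazarCuadrantes M n → Pre_remplazarCuadrantes M n → Spec_remplazarCuadrantes M n (remplazarCuadrantes M n)

-- ===== LEMMAS AND PROOFS =====

-- pyGetD at a nonnegative index is List.getD
theorem pvGetD_nonneg {α : Type} (xs : List α) (i : Int) (d : α) (h : 0 ≤ i) :
    PySem.List.pyGetD xs i d = xs.getD i.toNat d := by
  have e : i = ((i.toNat : Nat) : Int) := by omega
  conv_lhs => rw [e]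
  rw [PySem.List.pyGetD_natCast]

theorem pvSetD_nonneg {α : Type} (xs : List α) (i : Int) (v : α) (h : 0 ≤ i) :
    PySem.List.pySetD xs i v = xs.set i.toNat v := by
  have e : i = ((i.toNat : Nat) : Int) := by omega
  conv_lhs => rw [e]
  rw [PySem.List.pySetD_natCast]

theorem pvGetD_mapIdx {α β : Type} (f : Nat → α → β) (l : List α) (i : Nat) (d : β)
    (h : i < l.length) :
    (l.mapIdx f).getD i d = f i l[i] := by
  rw [List.getD_eq_getElem?_getD, List.getElem?_mapIdx, List.getElem?_eq_getElem h]
  rfl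

theorem pvGetD_out {α : Type} (l : List α) (i : Nat) (d : α) (h : l.length ≤ i) :
    l.getD i d = d := by
  rw [List.getD_eq_getElem?_getD, List.getElem?_eq_none h]
  rfl

theorem pvGetD_in {α : Type} (l : List α) (i : Nat) (d : α) (h : i < l.length) :
    l.getD i d = l[i] := by
  rw [List.getD_eq_getElem?_getD, List.getElem?_eq_getElem h]
  rfl

-- filling one row: a fold of pySetD over range(klo,khi) is a mapIdx
theorem pvRowFillAux (f : Int → Int) (khi : Int) (fuel : Nat) :
    ∀ (klo : Int), 0 ≤ klo → (khi - klo).toNat ≤ fuel →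
      ∀ r : List Int,
        (PySem.List.pyRange klo khi 1).foldl (fun r k => PySem.List.pySetD r k (f k)) r
          = r.mapIdx (fun k x => if klo ≤ (k : Int) ∧ (k : Int) < khi then f k else x) := by
  induction fuel with
  | zero =>
    intro klo h0 hf r
    rw [PySem.List.pyRange_one_eq_nil (show khi ≤ klo by omega)]
    simp only [List.foldl_nil]
    apply List.ext_getElem (by simp)
    intro i h1 h2
    simp only [List.getElem_mapIdx]
    rw [if_neg (by omega)]
  | succ m ih =>
    intro klo h0 hf r
    by_cases hlt : klo < khi
    · rw [PySem.List.pyRange_one_cons hlt]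
      simp only [List.foldl_cons]
      rw [pvSetD_nonneg r klo (f klo) h0]
      rw [ih (klo + 1) (by omega) (by omega)]
      apply List.ext_getElem (by simp)
      intro i h1 h2
      simp only [List.getElem_mapIdx, List.getElem_set]
      split_ifs <;>
        first
          | rfl
          | (exfalso; omega)
          | (rw [show ((i : Int)) = klo from by omega])
    · rw [PySem.List.pyRange_one_eq_nil (show khi ≤ klo by omega)]
      simp only [List.foldl_nil]
      apply List.ext_getElem (by simp)
      intro i h1 h2
      simp only [List.getElem_mapIdx]
      rw [if_neg (by omega)]

theorem pvRowFill (f : Int → Int) (klo khi : Int) (h0 : 0 ≤ klo) (r : List Int) :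
    (PySem.List.pyRange klo khi 1).foldl (fun r k => PySem.List.pySetD r k (f k)) r
      = r.mapIdx (fun k x => if klo ≤ (k : Int) ∧ (k : Int) < khi then f k else x) :=
  pvRowFillAux f khi (khi - klo).toNat klo h0 (le_refl _) r

-- a loop writing only to row j factors through List.set of a row-level loop
theorem pvCollapse (j : Int) (hj : 0 ≤ j) (f : Int → Int) :
    ∀ (ks : List Int), (∀ k ∈ ks, 0 ≤ k) → ∀ M : List (List Int),
      ks.foldl (fun M k => pySet2 M j k (f k)) M
        = M.set j.toNat
            (ks.foldl (fun r k => PySem.List.pySetD r k (f k)) (M.getD j.toNat [])) := by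
  intro ks
  induction ks with
  | nil =>
    intro _ M
    simp only [List.foldl_nil]
    apply List.ext_getElem (by simp)
    intro i h1 h2
    rw [List.getElem_set]
    split_ifs with hji
    · subst hji
      exact (pvGetD_in M j.toNat [] h1).symm
    · rfl
  | cons k t ih =>
    intro hks M
    have hk0 : 0 ≤ k := hks k (by simp)
    simp only [List.foldl_cons]
    rw [ih (fun k hk => hks k (by simp [hk]))]
    have hset2 : pySet2 M j k (f k)
        = M.set j.toNat (PySem.List.pySetD (M.getD j.toNat []) k (f k)) := by
      unfold pySet2
      rw [pvSetD_nonneg _ _ _ hj, pvGetD_nonneg _ _ _ hj]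
    rw [hset2, List.set_set]
    have hrow : (M.set j.toNat (PySem.List.pySetD (M.getD j.toNat []) k (f k))).getD j.toNat []
        = PySem.List.pySetD (M.getD j.toNat []) k (f k) := by
      by_cases hl : j.toNat < M.length
      · rw [pvGetD_in _ _ _ (by simpa using hl), List.getElem_set, if_pos rfl]
      · have hnoop : M.set j.toNat (PySem.List.pySetD (M.getD j.toNat []) k (f k)) = M := by
          apply List.ext_getElem (by simp)
          intro i h1 h2
          rw [List.getElem_set]
          split_ifs with hji
          · exfalso; simp only [List.length_set] at h1; omega
          · rfl
        rw [hnoop]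
        have hMd : M.getD j.toNat [] = ([] : List Int) := pvGetD_out _ _ _ (by omega)
        rw [hMd, pvSetD_nonneg ([] : List Int) k (f k) hk0]
        rfl
    rw [hrow]

-- the general nested rectangle fill is a mapIdx (the value may depend on the cell)
theorem pvRectFillAux (g : Int → Int → Int) (jhi klo khi : Int) (hk : 0 ≤ klo) (fuel : Nat) :
    ∀ (jlo : Int), 0 ≤ jlo → (jhi - jlo).toNat ≤ fuel →
      ∀ M : List (List Int),
        (PySem.List.pyRange jlo jhi 1).foldl
            (fun M j =>
              (PySem.List.pyRange klo khi 1).foldl (fun M k => pySet2 M j k (g j k)) M) M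
          = M.mapIdx (fun j row =>
              if jlo ≤ (j : Int) ∧ (j : Int) < jhi then
                row.mapIdx (fun k x =>
                  if klo ≤ (k : Int) ∧ (k : Int) < khi then g j k else x)
              else row) := by
  induction fuel with
  | zero =>
    intro jlo h0 hf M
    rw [PySem.List.pyRange_one_eq_nil (show jhi ≤ jlo by omega)]
    simp only [List.foldl_nil]
    apply List.ext_getElem (by simp)
    intro p h1 h2
    simp only [List.getElem_mapIdx]
    rw [if_neg (by omega)]
  | succ m ih =>
    intro jlo h0 hf M
    by_cases hlt : jlo < jhi
    · rw [PySem.List.pyRange_one_cons hlt]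
      simp only [List.foldl_cons]
      rw [pvCollapse jlo h0 (g jlo) (PySem.List.pyRange klo khi 1)
            (fun k hk' => by
              have := (PySem.List.mem_pyRange_one).1 hk'
              omega) M]
      rw [pvRowFill (g jlo) klo khi hk]
      rw [ih (jlo + 1) (by omega) (by omega)]
      apply List.ext_getElem (by simp)
      intro p h1 h2
      simp only [List.length_mapIdx, List.length_set] at h1 h2
      simp only [List.getElem_mapIdx, List.getElem_set]
      by_cases hpj : jlo.toNat = p
      · rw [if_neg (by omega), if_pos hpj,
          if_pos (show jlo ≤ ((p : Nat) : Int) ∧ ((p : Nat) : Int) < jhi by omega)]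
        subst hpj
        rw [pvGetD_in M jlo.toNat [] h2]
        rw [show ((jlo.toNat : Nat) : Int) = jlo from by omega]
      · rw [if_neg hpj]
        split_ifs <;> first | rfl | (exfalso; omega)
    · rw [PySem.List.pyRange_one_eq_nil (show jhi ≤ jlo by omega)]
      simp only [List.foldl_nil]
      apply List.ext_getElem (by simp)
      intro p h1 h2
      simp only [List.getElem_mapIdx]
      rw [if_neg (by omega)]

theorem pvRectFill (jlo jhi klo khi : Int) (hj : 0 ≤ jlo) (hk : 0 ≤ klo)
    (g : Int → Int → Int) (M : List (List Int)) :
    (PySem.List.pyRange jlo jhi 1).foldl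
        (fun M j =>
          (PySem.List.pyRange klo khi 1).foldl (fun M k => pySet2 M j k (g j k)) M) M
      = M.mapIdx (fun j row =>
          if jlo ≤ (j : Int) ∧ (j : Int) < jhi then
            row.mapIdx (fun k x =>
              if klo ≤ (k : Int) ∧ (k : Int) < khi then g j k else x)
          else row) :=
  pvRectFillAux g jhi klo khi hk (jhi - jlo).toNat jlo hj (le_refl _) M

theorem pvFillRect_eq (jlo jhi klo khi v : Int) (hj : 0 ≤ jlo) (hk : 0 ≤ klo)
    (M : List (List Int)) :
    fillRect M jlo jhi klo khi v
      = M.mapIdx (fun j row =>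
          if jlo ≤ (j : Int) ∧ (j : Int) < jhi then
            row.mapIdx (fun k x =>
              if klo ≤ (k : Int) ∧ (k : Int) < khi then v else x)
          else row) := by
  have h := pvRectFill jlo jhi klo khi hj hk (fun _ _ => v) M
  simpa [fillRect] using h

theorem pvGet2_eq (M : List (List Int)) (p q : Int) (hp : 0 ≤ p) (hq : 0 ≤ q) :
    pyGet2 M p q = (M.getD p.toNat []).getD q.toNat 0 := by
  unfold pyGet2
  rw [pvGetD_nonneg M p [] hp, pvGetD_nonneg (M.getD p.toNat []) q 0 hq]

-- a cell strictly outside the filled rectangle reads back unchanged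
theorem pvGet2_fillRect (jlo jhi klo khi v : Int) (hj : 0 ≤ jlo) (hk : 0 ≤ klo)
    (M : List (List Int)) (p q : Int) (hp : 0 ≤ p) (hq : 0 ≤ q)
    (hout : ¬(jlo ≤ p ∧ p < jhi) ∨ ¬(klo ≤ q ∧ q < khi)) :
    pyGet2 (fillRect M jlo jhi klo khi v) p q = pyGet2 M p q := by
  rw [pvFillRect_eq jlo jhi klo khi v hj hk, pvGet2_eq _ _ _ hp hq, pvGet2_eq _ _ _ hp hq]
  by_cases hpl : p.toNat < M.length
  · rw [pvGetD_mapIdx _ M p.toNat [] hpl, pvGetD_in M p.toNat [] hpl]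
    split_ifs with hc
    · by_cases hql : q.toNat < (M[p.toNat]'hpl).length
      · rw [pvGetD_mapIdx _ (M[p.toNat]'hpl) q.toNat 0 hql,
          pvGetD_in (M[p.toNat]'hpl) q.toNat 0 hql, if_neg (by omega)]
      · rw [pvGetD_out ((M[p.toNat]'hpl).mapIdx _) q.toNat 0
            (by simp only [List.length_mapIdx]; omega),
          pvGetD_out (M[p.toNat]'hpl) q.toNat 0 (by omega)]
    · rfl
  · rw [pvGetD_out (M.mapIdx _) p.toNat [] (by simp only [List.length_mapIdx]; omega),
      pvGetD_out M p.toNat [] (by omega)]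

-- B's row-update loop: a fold that replaces each whole row j by g j (its current row)
-- is a mapIdx (each row is written once and g reads only that row)
theorem pvRowLoopAux (g : Int → List Int → List Int) (jhi : Int) (fuel : Nat) :
    ∀ (jlo : Int), 0 ≤ jlo → (jhi - jlo).toNat ≤ fuel →
      ∀ M : List (List Int),
        (PySem.List.pyRange jlo jhi 1).foldl
            (fun M j => PySem.List.pySetD M j (g j (PySem.List.pyGetD M j []))) M
          = M.mapIdx (fun j row =>
              if jlo ≤ (j : Int) ∧ (j : Int) < jhi then g j row else row) := by
  induction fuel with
  | zero =>
    intro jlo h0 hf M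
    rw [PySem.List.pyRange_one_eq_nil (show jhi ≤ jlo by omega)]
    simp only [List.foldl_nil]
    apply List.ext_getElem (by simp)
    intro p h1 h2
    simp only [List.getElem_mapIdx]
    rw [if_neg (by omega)]
  | succ m ih =>
    intro jlo h0 hf M
    by_cases hlt : jlo < jhi
    · rw [PySem.List.pyRange_one_cons hlt]
      simp only [List.foldl_cons]
      rw [pvSetD_nonneg M jlo _ h0, pvGetD_nonneg M jlo [] h0]
      rw [ih (jlo + 1) (by omega) (by omega)]
      apply List.ext_getElem (by simp)
      intro p h1 h2
      simp only [List.length_mapIdx, List.length_set] at h1 h2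
      simp only [List.getElem_mapIdx, List.getElem_set]
      by_cases hpj : jlo.toNat = p
      · rw [if_neg (by omega), if_pos hpj,
          if_pos (show jlo ≤ ((p : Nat) : Int) ∧ ((p : Nat) : Int) < jhi by omega)]
        subst hpj
        rw [pvGetD_in M jlo.toNat [] h2]
        rw [show ((jlo.toNat : Nat) : Int) = jlo from by omega]
      · rw [if_neg hpj]
        split_ifs <;> first | rfl | (exfalso; omega)
    · rw [PySem.List.pyRange_one_eq_nil (show jhi ≤ jlo by omega)]
      simp only [List.foldl_nil]
      apply List.ext_getElem (by simp)
      intro p h1 h2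
      simp only [List.getElem_mapIdx]
      rw [if_neg (by omega)]

theorem pvRowLoop (g : Int → List Int → List Int) (jlo jhi : Int) (h0 : 0 ≤ jlo)
    (M : List (List Int)) :
    (PySem.List.pyRange jlo jhi 1).foldl
        (fun M j => PySem.List.pySetD M j (g j (PySem.List.pyGetD M j []))) M
      = M.mapIdx (fun j row =>
          if jlo ≤ (j : Int) ∧ (j : Int) < jhi then g j row else row) :=
  pvRowLoopAux g jhi (jhi - jlo).toNat jlo h0 (le_refl _) M

-- the spliced row template equals the per-cell if-form of the same row
theorem pvRowTemplate (n : Int) (h1 : 1 ≤ n) (v1 v2 : Int) (row : List Int)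
    (hlen : 2 * n ≤ (row.length : Int)) :
    (List.replicate n.toNat v1 ++ List.replicate n.toNat v2) ++ row.drop (2 * n).toNat
      = row.mapIdx (fun k x =>
          if 0 ≤ (k : Int) ∧ (k : Int) < 2 * n then
            (if (k : Int) < n then v1 else v2) else x) := by
  apply List.ext_getElem (by simp; omega)
  intro q hq1 hq2
  simp only [List.length_append, List.length_replicate, List.length_drop] at hq1
  simp only [List.getElem_mapIdx]
  by_cases hc1 : q < n.toNat
  · rw [List.getElem_append_left (by simp only [List.length_append, List.length_replicate]; omega),
      List.getElem_append_left (by simp only [List.length_replicate]; omega),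
      List.getElem_replicate, if_pos (by omega), if_pos (by omega)]
  · by_cases hc2 : q < n.toNat + n.toNat
    · rw [List.getElem_append_left (by simp only [List.length_append, List.length_replicate]; omega),
        List.getElem_append_right (by simp only [List.length_replicate]; omega),
        List.getElem_replicate, if_pos (by omega), if_neg (by omega)]
    · rw [List.getElem_append_right (by simp only [List.length_append, List.length_replicate]; omega)]
      rw [if_neg (by omega)]
      simp only [List.length_append, List.length_replicate]
      rw [List.getElem_drop]
      congr 1
      omega

-- B in the same per-cell form as A's rectangle fills
theorem pvAlt_cellform (M : List (List Int)) (n : Int) (h1 : 1 ≤ n)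
    (hlen : ∀ row ∈ M.take (2 * n).toNat, 2 * n ≤ (row.length : Int)) :
    remplazarCuadrantes_alt M n
      = M.mapIdx (fun j row =>
          if 0 ≤ (j : Int) ∧ (j : Int) < 2 * n then
            row.mapIdx (fun k x =>
              if 0 ≤ (k : Int) ∧ (k : Int) < 2 * n then
                (if (j : Int) < n then
                    (if (k : Int) < n then pyGet2 M n (2 * n - 1) else pyGet2 M n (n - 1))
                  else
                    (if (k : Int) < n then pyGet2 M 0 n else pyGet2 M 0 0))
              else x)
          else row) := by
  simp only [remplazarCuadrantes_alt]
  rw [pvRowLoop (fun j r =>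
        (List.replicate n.toNat (pyGet2 M n (2 * n - 1)) ++
          List.replicate n.toNat (pyGet2 M n (n - 1))) ++
          PySem.List.slice r (some (2 * n)) none) 0 n (le_refl 0),
      pvRowLoop (fun j r =>
        (List.replicate n.toNat (pyGet2 M 0 n) ++
          List.replicate n.toNat (pyGet2 M 0 0)) ++
          PySem.List.slice r (some (2 * n)) none) n (2 * n) (by omega)]
  apply List.ext_getElem (by simp)
  intro p hp1 hp2
  simp only [List.length_mapIdx] at hp1 hp2
  simp only [List.getElem_mapIdx]
  have hrowmem : p < (2 * n).toNat → M[p] ∈ M.take (2 * n).toNat := by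
    intro hplt
    have : (M.take (2 * n).toNat)[p]'(by simp; omega) = M[p] := List.getElem_take
    rw [← this]
    exact List.getElem_mem _
  have hslice : ∀ row : List Int,
      PySem.List.slice row (some (2 * n)) none = row.drop (2 * n).toNat :=
    fun row => PySem.List.slice_from row (by omega)
  simp only [hslice]
  by_cases hA : ((p : Nat) : Int) < n
  · rw [if_neg (show ¬(n ≤ ((p : Nat) : Int) ∧ ((p : Nat) : Int) < 2 * n) by omega),
      if_pos (show (0 : Int) ≤ ((p : Nat) : Int) ∧ ((p : Nat) : Int) < n by omega),
      if_pos (show (0 : Int) ≤ ((p : Nat) : Int) ∧ ((p : Nat) : Int) < 2 * n by omega)]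
    rw [pvRowTemplate n h1 _ _ _ (hlen _ (hrowmem (by omega)))]
    apply List.ext_getElem (by simp)
    intro q hq1 hq2
    simp only [List.getElem_mapIdx]
    split_ifs <;> rfl
  · by_cases hB : ((p : Nat) : Int) < 2 * n
    · rw [if_pos (show n ≤ ((p : Nat) : Int) ∧ ((p : Nat) : Int) < 2 * n by omega),
        if_neg (show ¬((0 : Int) ≤ ((p : Nat) : Int) ∧ ((p : Nat) : Int) < n) by omega),
        if_pos (show (0 : Int) ≤ ((p : Nat) : Int) ∧ ((p : Nat) : Int) < 2 * n by omega)]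
      rw [pvRowTemplate n h1 _ _ _ (hlen _ (hrowmem (by omega)))]
      apply List.ext_getElem (by simp)
      intro q hq1 hq2
      simp only [List.getElem_mapIdx]
      split_ifs <;> rfl
    · rw [if_neg (show ¬(n ≤ ((p : Nat) : Int) ∧ ((p : Nat) : Int) < 2 * n) by omega),
        if_neg (show ¬((0 : Int) ≤ ((p : Nat) : Int) ∧ ((p : Nat) : Int) < n) by omega),
        if_neg (show ¬((0 : Int) ≤ ((p : Nat) : Int) ∧ ((p : Nat) : Int) < 2 * n) by omega)]

theorem pvA_nonpos (M : List (List Int)) (n : Int) (h : n ≤ 0) :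
    remplazarCuadrantes M n = M := by
  have hR2 : PySem.List.pyRange 0 2 1 = [0, 1] := by decide
  have e1 : PySem.List.pyRange 0 n 1 = [] := PySem.List.pyRange_one_eq_nil (by omega)
  have e2 : PySem.List.pyRange n (2 * n) 1 = [] := PySem.List.pyRange_one_eq_nil (by omega)
  simp [remplazarCuadrantes, fillRect, hR2, e1, e2]

theorem pvB_nonpos (M : List (List Int)) (n : Int) (h : n ≤ 0) :
    remplazarCuadrantes_alt M n = M := by
  have e1 : PySem.List.pyRange 0 n 1 = [] := PySem.List.pyRange_one_eq_nil (by omega)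
  have e2 : PySem.List.pyRange n (2 * n) 1 = [] := PySem.List.pyRange_one_eq_nil (by omega)
  simp [remplazarCuadrantes_alt, e1, e2]

theorem pvMain_pos (M : List (List Int)) (n : Int) (h1 : 1 ≤ n)
    (hlen : ∀ row ∈ M.take (2 * n).toNat, 2 * n ≤ (row.length : Int)) :
    remplazarCuadrantes M n = remplazarCuadrantes_alt M n := by
  have hR2 : PySem.List.pyRange 0 2 1 = [0, 1] := by decide
  have h2n : 2 * n - n = n := by ring
  have hnn : n + n = 2 * n := by ring
  rw [remplazarCuadrantes, hR2]
  simp only [List.foldl_cons, List.foldl_nil, mul_zero, mul_one, zero_mul, one_mul,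
    sub_zero, add_zero, sub_self, h2n, hnn]
  rw [pvGet2_fillRect n (2 * n) n (2 * n) (pyGet2 M 0 0) (by omega) (by omega) _ n (n - 1)
      (by omega) (by omega) (Or.inr (by omega))]
  rw [pvGet2_fillRect 0 n 0 n (pyGet2 M n (2 * n - 1)) (le_refl 0) (le_refl 0) M n (n - 1)
      (by omega) (by omega) (Or.inl (by omega))]
  rw [pvGet2_fillRect n (2 * n) n (2 * n) (pyGet2 M 0 0) (by omega) (by omega) _ 0 n
      (by omega) (by omega) (Or.inl (by omega))]
  rw [pvGet2_fillRect 0 n 0 n (pyGet2 M n (2 * n - 1)) (le_refl 0) (le_refl 0) M 0 n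
      (by omega) (by omega) (Or.inr (by omega))]
  rw [pvAlt_cellform M n h1 hlen]
  rw [pvFillRect_eq 0 n 0 n (pyGet2 M n (2 * n - 1)) (le_refl 0) (le_refl 0) M]
  rw [pvFillRect_eq n (2 * n) n (2 * n) (pyGet2 M 0 0) (by omega) (by omega)]
  rw [pvFillRect_eq 0 n n (2 * n) (pyGet2 M n (n - 1)) (le_refl 0) (by omega)]
  rw [pvFillRect_eq n (2 * n) 0 n (pyGet2 M 0 n) (by omega) (le_refl 0)]
  apply List.ext_getElem (by simp)
  intro p hp1 hp2
  simp only [List.length_mapIdx] at hp1 hp2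
  simp only [List.getElem_mapIdx]
  split_ifs <;>
    first
      | rfl
      | (exfalso; omega)
      | (apply List.ext_getElem (by simp)
         intro q hq1 hq2
         simp only [List.getElem_mapIdx]
         split_ifs <;> first | rfl | omega)

-- ===== VERDICT (by name: the statement is the Claim_ definition above) =====
theorem remplazarCuadrantes_spec : Claim_equal_remplazarCuadrantes := by
  intro M n _ hpre
  unfold Spec_remplazarCuadrantes
  rcases hpre with ⟨h1, -, hlen⟩ | ⟨h0, -⟩
  · exact pvMain_pos M n h1 hlen
  · rw [pvA_nonpos M n h0, pvB_nonpos M n h0]
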